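-- pv_equiv track=rewrite | github.com/KPEdit/AT_lab2 | lib/baseDFA.py | _genName
-- ===== SOURCE A (Python) =====
-- def _genName(i):
--   i = max(0, i)
--   if i == 0:
--     return 'A'
--   s = ''
--   S = "ABCDEFGIJKLMNOPQESTUVWXYZ"
--   while i > 0:
--     c = i % len(S)
--     s += S[c]
--     i = i // len(S)
--   return s[::-1]
-- ===== SOURCE B (Python) =====
-- def _genName(i):
--   i = max(0, i)
--   if i == 0:
--     return 'A'
--   S = "ABCDEFGIJKLMNOPQESTUVWXYZ"
--   # find the highest power of len(S) not exceeding i, then emit digits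
--   # most-significant first by repeated division by that shrinking power.
--   p = 1
--   while p * len(S) <= i:
--     p *= len(S)
--   out = []
--   while p > 0:
--     out.append(S[(i // p) % len(S)])
--     p //= len(S)
--   return ''.join(out)
-- ===== Notes on version B (the rewrite author's own statement) =====
-- stated objective: alternative
-- what changed: Replaced A's LSB-first digit accumulation followed by a [::-1] reversal with a two-stage scheme: first find the highest power of the alphabet size not exceeding i, then emit digits most-significant first by dividing by that shrinking power, so no reversal is needed.
import Mathlib
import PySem

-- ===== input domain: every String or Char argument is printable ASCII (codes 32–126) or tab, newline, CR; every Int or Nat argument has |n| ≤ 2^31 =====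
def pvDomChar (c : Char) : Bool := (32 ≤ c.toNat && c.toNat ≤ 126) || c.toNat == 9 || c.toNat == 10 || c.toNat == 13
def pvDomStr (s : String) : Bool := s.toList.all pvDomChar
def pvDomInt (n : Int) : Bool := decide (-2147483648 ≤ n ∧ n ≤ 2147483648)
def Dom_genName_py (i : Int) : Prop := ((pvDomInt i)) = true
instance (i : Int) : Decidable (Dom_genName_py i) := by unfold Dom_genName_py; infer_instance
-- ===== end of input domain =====

-- B replaces A's LSB-first digit accumulation + final [::-1] with a two-stage scheme:
-- first find the highest power of 25 not exceeding i, then emit digits most-significant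
-- first by dividing by that shrinking power (objective: alternative, same cost).

-- the S alphabet of _genName (copied exactly, with its duplicate 'E' and missing 'H'); length 25
def pvS : List Char := "ABCDEFGIJKLMNOPQESTUVWXYZ".toList

-- ===== PORT A =====
-- the while loop of A: state (i, s); S[c] is in range because 0 ≤ i % 25 < 25, so pyGetD is exact
def pvALoop (i : Int) (s : List Char) : List Char :=
  if 0 < i then
    pvALoop (PySem.Int.floordiv i 25) (s ++ [PySem.List.pyGetD pvS (PySem.Int.mod i 25) 'A'])
  else s
termination_by i.toNat
decreasing_by
  have h25 : (0:Int) < 25 := by norm_num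
  rw [PySem.Int.floordiv_eq_ediv_of_pos h25]
  omega

def genName_py (i : Int) : String :=
  let i' := max 0 i
  if i' = 0 then "A"
  else String.ofList ((PySem.List.slice? (pvALoop i' []) none none (-1)).getD [])

-- ===== PORT B =====
-- B's first loop: 'while p * 25 <= i: p *= 25'; the conjunct 0 < p is only a totality
-- guard (in Source B p starts at 1 and is only ever multiplied by 25, so it is invariant)
def pvPow (n p : Int) : Int :=
  if 0 < p ∧ p * 25 ≤ n then pvPow n (p * 25) else p
termination_by (n - p).toNat
decreasing_by omega

-- B's second loop: 'while p > 0: out.append(S[(i // p) % 25]); p //= 25', state (p, out)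
def pvBLoop (n p : Int) (out : List Char) : List Char :=
  if 0 < p then
    pvBLoop n (PySem.Int.floordiv p 25)
      (out ++ [PySem.List.pyGetD pvS (PySem.Int.mod (PySem.Int.floordiv n p) 25) 'A'])
  else out
termination_by p.toNat
decreasing_by
  have h25 : (0:Int) < 25 := by norm_num
  rw [PySem.Int.floordiv_eq_ediv_of_pos h25]
  omega

def genName_py_alt (i : Int) : String :=
  let i' := max 0 i
  if i' = 0 then "A"
  else String.ofList (pvBLoop i' (pvPow i' 1) [])

-- ===== PRECONDITION & SPEC =====
def Spec_genName_py (i : Int) (out : String) : Prop := out = genName_py_alt i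
instance (i : Int) (out : String) : Decidable (Spec_genName_py i out) := by unfold Spec_genName_py; infer_instance

-- ===== CLAIM (what is proved, stated in full; the proofs are below) =====
def Claim_equal_genName_py : Prop := ∀ (i : Int), Dom_genName_py i → Spec_genName_py i (genName_py i)

-- ===== LEMMAS AND PROOFS =====

-- proof-side LSB-first digit list of n (floordiv/mod rewritten to ediv/emod, exact since 0 < 25)
def pvDig (n : Int) : List Char :=
  if 0 < n then PySem.List.pyGetD pvS (n % 25) 'A' :: pvDig (n / 25) else []
termination_by n.toNat
decreasing_by omega

-- proof-side cons form of B's second loop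
def pvBEmit (n p : Int) : List Char :=
  if 0 < p then PySem.List.pyGetD pvS ((n / p) % 25) 'A' :: pvBEmit n (p / 25) else []
termination_by p.toNat
decreasing_by omega

theorem pvALoop_eq (i : Int) (s : List Char) : pvALoop i s = s ++ pvDig i := by
  fun_induction pvALoop i s with
  | case1 i s h ih =>
      rw [ ih,
        PySem.Int.floordiv_eq_ediv_of_pos (by norm_num : (0:Int) < 25),
        PySem.Int.mod_eq_emod_of_pos (by norm_num : (0:Int) < 25)]
      conv_rhs => rw [pvDig]
      rw [if_pos h]
      simp
  | case2 i s h =>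
      conv_rhs => rw [pvDig]
      rw [if_neg h]
      simp

theorem pvBLoop_eq (n p : Int) (out : List Char) : pvBLoop n p out = out ++ pvBEmit n p := by
  fun_induction pvBLoop n p out with
  | case1 p out h ih =>
      rw [ ih,
        PySem.Int.floordiv_eq_ediv_of_pos (by norm_num : (0:Int) < 25),
        PySem.Int.mod_eq_emod_of_pos (by norm_num : (0:Int) < 25)]
      rw [PySem.Int.floordiv_eq_ediv_of_pos h]
      conv_rhs => rw [pvBEmit]
      rw [if_pos h]
      simp
  | case2 p out h =>
      conv_rhs => rw [pvBEmit]
      rw [if_neg h]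
      simp

theorem pvPow_spec (n p : Int) (hp : 0 < p) (hpn : p ≤ n) (hk : ∃ k : ℕ, p = 25 ^ k) :
    ∃ k : ℕ, pvPow n p = 25 ^ k ∧ 25 ^ k ≤ n ∧ n < 25 ^ (k + 1) := by
  fun_induction pvPow n p with
  | case1 p h ih =>
      obtain ⟨k, rfl⟩ := hk
      exact ih (by positivity) h.2 ⟨k + 1, by ring⟩
  | case2 p h =>
      obtain ⟨k, rfl⟩ := hk
      refine ⟨k, rfl, hpn, ?_⟩
      have : ¬ (25 ^ k * 25 ≤ n) := by tauto
      calc n < 25 ^ k * 25 := by omega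
        _ = 25 ^ (k + 1) := by ring

theorem pvBEmit_shift (k : ℕ) (n : Int) (hn : 0 ≤ n) :
    pvBEmit n (25 ^ (k + 1)) =
      pvBEmit (n / 25) (25 ^ k) ++ [PySem.List.pyGetD pvS (n % 25) 'A'] := by
  induction k generalizing n with
  | zero =>
      rw [pvBEmit, if_pos (by norm_num)]
      rw [show ((25:Int) ^ (0 + 1)) = 25 by norm_num]
      rw [show ((25:Int) / 25) = 1 by decide]
      rw [pvBEmit, if_pos (by norm_num : (0:Int) < 1)]
      rw [show ((1:Int) / 25) = 0 by decide]
      rw [pvBEmit, if_neg (by norm_num : ¬ (0:Int) < 0)]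
      rw [pvBEmit, if_pos (by positivity : (0:Int) < 25 ^ (0:ℕ))]
      rw [show ((25:Int) ^ (0:ℕ)) = 1 by norm_num]
      rw [show ((1:Int) / 25) = 0 by decide]
      rw [pvBEmit, if_neg (by norm_num : ¬ (0:Int) < 0)]
      simp
  | succ k ih =>
      rw [pvBEmit, if_pos (by positivity : (0:Int) < 25 ^ (k + 1 + 1))]
      have hdiv : ((25:Int) ^ (k + 1 + 1)) / 25 = 25 ^ (k + 1) := by
        rw [pow_succ]; exact Int.mul_ediv_cancel _ (by norm_num)
      rw [hdiv, ih n hn]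
      conv_rhs =>
        rw [pvBEmit, if_pos (by positivity : (0:Int) < 25 ^ (k + 1))]
      have hdiv2 : ((25:Int) ^ (k + 1)) / 25 = 25 ^ k := by
        rw [pow_succ]; exact Int.mul_ediv_cancel _ (by norm_num)
      rw [hdiv2]
      have hcomp : n / 25 / 25 ^ (k + 1) = n / 25 ^ (k + 1 + 1) := by
        rw [Int.ediv_ediv_of_nonneg (by norm_num : (0:Int) ≤ 25)]
        congr 1; ring
      rw [hcomp]
      simp

theorem pvBEmit_eq_rev (k : ℕ) : ∀ n : Int, 25 ^ k ≤ n → n < 25 ^ (k + 1) →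
    pvBEmit n (25 ^ k) = (pvDig n).reverse := by
  induction k with
  | zero =>
      intro n h1 h2
      simp only [pow_zero] at h1
      have h2' : n < 25 := by simpa using h2
      rw [show ((25:Int) ^ (0:ℕ)) = 1 by norm_num]
      rw [pvBEmit, if_pos (by norm_num : (0:Int) < 1)]
      rw [show ((1:Int) / 25) = 0 by decide]
      rw [pvBEmit, if_neg (by norm_num : ¬ (0:Int) < 0)]
      rw [pvDig, if_pos (by omega : (0:Int) < n)]
      rw [Int.ediv_eq_zero_of_lt (by omega) h2']
      rw [pvDig, if_neg (by norm_num : ¬ (0:Int) < 0)]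
      simp
  | succ k ih =>
      intro n h1 h2
      have hn0 : 0 ≤ n := le_trans (by positivity) h1
      rw [pvBEmit_shift _ _ hn0]
      have hlo : 25 ^ k ≤ n / 25 := by
        rw [Int.le_ediv_iff_mul_le (by norm_num : (0:Int) < 25)]
        calc (25:Int) ^ k * 25 = 25 ^ (k + 1) := by ring
          _ ≤ n := h1
      have hhi : n / 25 < 25 ^ (k + 1) := by
        by_contra hcon
        push Not at hcon
        rw [Int.le_ediv_iff_mul_le (by norm_num : (0:Int) < 25)] at hcon
        have : (25:Int) ^ (k + 1) * 25 = 25 ^ (k + 1 + 1) := by ring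
        omega
      rw [ih _ hlo hhi]
      have hn1 : (0:Int) < n := lt_of_lt_of_le (by positivity) h1
      conv_rhs => rw [pvDig, if_pos hn1]
      simp

-- ===== VERDICT (by name: the statement is the Claim_ definition above) =====
theorem genName_py_spec : Claim_equal_genName_py := by
  intro i _
  unfold Spec_genName_py genName_py genName_py_alt
  by_cases h : max 0 i = 0
  · simp [h]
  · simp only [if_neg h]
    have hpos : 0 < max 0 i := by omega
    rw [PySem.List.slice?_none_none_neg_one, Option.getD_some, pvALoop_eq, pvBLoop_eq]
    obtain ⟨k, hpow, hlo, hhi⟩ := pvPow_spec (max 0 i) 1 (by norm_num) (by omega) ⟨0, by norm_num⟩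
    rw [hpow, pvBEmit_eq_rev k _ hlo hhi]
    simp
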